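-- pv_equiv track=rewrite | github.com/cigar187/axiom | app/services/mlb_stats.py | _identify_closer
-- ===== SOURCE A (Python) =====
-- from typing import Any, Optional
--
-- def _identify_closer(
--     yesterday: dict[str, int],
--     two_days_ago: dict[str, int],
-- ) -> Optional[str]:
--     """
--     Identify the primary closer as the RP who threw the most pitches
--     across both days combined. This is a simple but effective proxy
--     for 'highest leverage arm' without needing role/appearance data.
--     """
--     totals: dict[str, int] = {}
--     for pid, count in yesterday.items():
--         totals[pid] = totals.get(pid, 0) + count
--     for pid, count in two_days_ago.items():
--         totals[pid] = totals.get(pid, 0) + count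
--     if not totals:
--         return None
--     return max(totals, key=lambda p: totals[p])
-- ===== SOURCE B (Python) =====
-- from typing import Optional
--
--
-- def _identify_closer(
--     yesterday: dict[str, int],
--     two_days_ago: dict[str, int],
-- ) -> Optional[str]:
--     # Fused single pass: visit yesterday's pitchers, then two-days-ago pitchers
--     # not seen yesterday; keep a running best, updating only on a strictly
--     # greater combined total (so the first-seen pitcher wins ties, like max()).
--     best: Optional[str] = None
--     best_total = 0
--     for pid in yesterday:
--         total = yesterday.get(pid, 0) + two_days_ago.get(pid, 0)
--         if best is None or total > best_total:
--             best, best_total = pid, total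
--     for pid in two_days_ago:
--         if pid in yesterday:
--             continue
--         total = two_days_ago.get(pid, 0)
--         if best is None or total > best_total:
--             best, best_total = pid, total
--     return best
-- ===== Notes on version B (the rewrite author's own statement) =====
-- stated objective: alternative
-- what changed: Replaces A's build-a-totals-dict-then-max two-phase aggregation with a fused single pass that visits yesterday's keys then two-days-ago's new keys, computing each combined total on the fly and keeping a running best updated only on strictly greater totals (first-seen wins ties, like max).
import Mathlib
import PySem

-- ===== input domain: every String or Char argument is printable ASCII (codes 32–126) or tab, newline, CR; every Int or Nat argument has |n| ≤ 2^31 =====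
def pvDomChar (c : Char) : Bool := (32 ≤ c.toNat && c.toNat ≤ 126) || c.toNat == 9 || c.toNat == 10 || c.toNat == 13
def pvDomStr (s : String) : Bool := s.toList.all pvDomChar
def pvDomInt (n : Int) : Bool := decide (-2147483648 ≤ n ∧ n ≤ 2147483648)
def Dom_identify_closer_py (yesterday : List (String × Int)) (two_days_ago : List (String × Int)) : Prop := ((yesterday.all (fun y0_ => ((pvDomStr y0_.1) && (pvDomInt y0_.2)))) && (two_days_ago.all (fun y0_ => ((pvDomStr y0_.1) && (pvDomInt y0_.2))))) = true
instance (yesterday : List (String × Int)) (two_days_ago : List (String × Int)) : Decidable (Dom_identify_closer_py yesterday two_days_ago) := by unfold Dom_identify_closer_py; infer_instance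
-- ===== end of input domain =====

-- B fuses A's two dict-building loops and the final max() into one running-best pass; same cost, no totals dict.

-- ===== PORT A =====
def identify_closer_py (yesterday : List (String × Int)) (two_days_ago : List (String × Int)) : Option String :=
  -- totals: dict[str, int] = {}; for pid, count in yesterday.items(): totals[pid] = totals.get(pid, 0) + count
  let totals1 : PySem.Dict String Int :=
    yesterday.foldl (fun d p => d.insert p.1 (d.getD p.1 0 + p.2)) PySem.Dict.empty
  -- for pid, count in two_days_ago.items(): totals[pid] = totals.get(pid, 0) + count
  let totals : PySem.Dict String Int :=
    two_days_ago.foldl (fun d p => d.insert p.1 (d.getD p.1 0 + p.2)) totals1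
  -- if not totals: return None
  if totals.items = [] then none
  -- return max(totals, key=lambda p: totals[p])  (p ranges over totals' keys, so totals[p] never raises; getD 0 is exact here)
  else PySem.List.max? totals.keys (fun p => totals.getD p 0)

-- ===== PORT B =====
-- 'best is None or total > best_total' step; best/best_total carried as one Option (pid, total)
def pvBest (best : Option (String × Int)) (pid : String) (total : Int) : Option (String × Int) :=
  match best with
  | none => some (pid, total)
  | some q => if total > q.2 then some (pid, total) else some q

def identify_closer_py_alt (yesterday : List (String × Int)) (two_days_ago : List (String × Int)) : Option String :=
  let dy : PySem.Dict String Int := PySem.Dict.mk yesterday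
  let dt : PySem.Dict String Int := PySem.Dict.mk two_days_ago
  -- for pid in yesterday: total = yesterday.get(pid, 0) + two_days_ago.get(pid, 0); update best
  let s1 := yesterday.foldl (fun best p => pvBest best p.1 (dy.getD p.1 0 + dt.getD p.1 0)) none
  -- for pid in two_days_ago: if pid in yesterday: continue; total = two_days_ago.get(pid, 0); update best
  let s2 := two_days_ago.foldl
    (fun best p => if dy.contains p.1 then best else pvBest best p.1 (dt.getD p.1 0)) s1
  s2.map Prod.fst

-- ===== PRECONDITION & SPEC =====
-- Pre_ excludes association lists with duplicate keys: a Python dict[str, int] cannot contain a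
-- duplicate key, so such lists represent no input the Python programs can receive.
def Pre_identify_closer_py (yesterday : List (String × Int)) (two_days_ago : List (String × Int)) : Prop :=
  (yesterday.map Prod.fst).Nodup ∧ (two_days_ago.map Prod.fst).Nodup
instance (yesterday : List (String × Int)) (two_days_ago : List (String × Int)) : Decidable (Pre_identify_closer_py yesterday two_days_ago) := by unfold Pre_identify_closer_py; infer_instance

def pvWitness_identify_closer_py : (List (String × Int)) × (List (String × Int)) :=
  ([("smith", 17), ("jones", 12)], [("jones", 9), ("lee", 20)])

def Spec_identify_closer_py (yesterday : List (String × Int)) (two_days_ago : List (String × Int)) (out : Option String) : Prop := out = identify_closer_py_alt yesterday two_days_ago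
instance (yesterday : List (String × Int)) (two_days_ago : List (String × Int)) (out : Option String) : Decidable (Spec_identify_closer_py yesterday two_days_ago out) := by unfold Spec_identify_closer_py; infer_instance

-- ===== CLAIM (what is proved, stated in full; the proofs are below) =====
def Claim_equal_identify_closer_py : Prop := ∀ (yesterday : List (String × Int)) (two_days_ago : List (String × Int)), Dom_identify_closer_py yesterday two_days_ago → Pre_identify_closer_py yesterday two_days_ago → Spec_identify_closer_py yesterday two_days_ago (identify_closer_py yesterday two_days_ago)

-- ===== LEMMAS AND PROOFS =====

-- the combined-total key function and the key visit order both programs reduce to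
def pvG (yesterday two_days_ago : List (String × Int)) : String → Int :=
  fun k => (PySem.Dict.mk yesterday).getD k 0 + (PySem.Dict.mk two_days_ago).getD k 0

def pvOrder (yesterday two_days_ago : List (String × Int)) : List String :=
  yesterday.map Prod.fst
    ++ (two_days_ago.map Prod.fst).filter (fun k => !(yesterday.map Prod.fst).contains k)

-- max?'s fold step, named so it can be rewritten
def pvMaxStep (g : String → Int) (a : Option String) (x : String) : Option String :=
  match a with
  | none => some x
  | some m => if g m < g x then some x else some m

theorem pv_max?_eq_foldl (g : String → Int) (xs : List String) :
    PySem.List.max? xs g = xs.foldl (pvMaxStep g) none := by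
  unfold PySem.List.max?
  apply PySem.List.foldl_congr_mem
  intro acc x _
  cases acc <;> rfl

-- sum of the counts recorded for key k in the association list l
def pvSumF (l : List (String × Int)) (k : String) : Int :=
  ((l.filter (fun p => p.1 == k)).map Prod.snd).sum

theorem pvSumF_eq_zero {l : List (String × Int)} {k : String}
    (h : k ∉ l.map Prod.fst) : pvSumF l k = 0 := by
  unfold pvSumF
  have : l.filter (fun p => p.1 == k) = [] := by
    rw [List.filter_eq_nil_iff]
    intro p hp hk
    exact h (List.mem_map.mpr ⟨p, hp, beq_iff_eq.mp hk⟩)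
  simp [this]

-- A's accumulation loop, lookup-level characterisation
theorem pv_addfold_getD (l : List (String × Int)) (d : PySem.Dict String Int) (k : String) :
    (l.foldl (fun d p => d.insert p.1 (d.getD p.1 0 + p.2)) d).getD k 0
      = d.getD k 0 + pvSumF l k := by
  induction l generalizing d with
  | nil => simp [pvSumF]
  | cons p t ih =>
    rw [List.foldl_cons, ih]
    unfold pvSumF
    by_cases hk : k = p.1
    · subst hk
      rw [PySem.Dict.getD_insert_self]
      simp
      ring
    · rw [PySem.Dict.getD_insert_of_ne _ _ _ hk]
      have : (p.1 == k) = false := by simpa using fun h => hk h.symm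
      simp [this]

-- first-match lookup on a duplicate-free association list equals the filtered sum
theorem pv_mk_getD_eq_sumF (l : List (String × Int)) (k : String)
    (h : (l.map Prod.fst).Nodup) :
    (PySem.Dict.mk l).getD k 0 = pvSumF l k := by
  induction l with
  | nil => rfl
  | cons p t ih =>
    obtain ⟨k0, v0⟩ := p
    simp only [List.map_cons, List.nodup_cons] at h
    unfold pvSumF
    by_cases hk : k0 = k
    · have hzero : pvSumF t k = 0 := pvSumF_eq_zero (hk ▸ h.1)
      unfold pvSumF at hzero
      simp [PySem.Dict.getD_eq_get?_getD, PySem.Dict.get?_mk_cons, hk, hzero]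
    · have hb : (k0 == k) = false := by simpa using hk
      have := ih h.2
      unfold pvSumF at this
      simp only [List.filter_cons, hb, Bool.false_eq_true, if_false]
      rw [← this]
      simp [PySem.Dict.getD_eq_get?_getD, PySem.Dict.get?_mk_cons, hb]

theorem pv_dict_contains_eq (l : List (String × Int)) (k : String) :
    (PySem.Dict.mk l).contains k = (l.map Prod.fst).contains k := by
  induction l with
  | nil => rfl
  | cons h t ih =>
    simp only [PySem.Dict.contains, List.any_cons] at ih ⊢
    simp only [List.map_cons, List.contains_cons]
    rw [← ih, BEq.comm]

-- Set.update on a duplicate-free batch appends exactly the new keys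
theorem pv_update_eq_append_filter (xs : List String) (s : PySem.Set String)
    (h : xs.Nodup) :
    PySem.Set.update s xs = s ++ xs.filter (fun x => !s.contains x) := by
  induction xs generalizing s with
  | nil => simp [PySem.Set.update]
  | cons x t ih =>
    simp only [List.nodup_cons] at h
    simp only [PySem.Set.update, List.foldl_cons] at ih ⊢
    by_cases hx : s.contains x
    · have hfx : (!s.contains x) = false := by rw [hx]; rfl
      rw [PySem.Set.add, if_pos hx, ih _ h.2]
      simp only [List.filter_cons, hfx, Bool.false_eq_true, if_false]
    · have hx' : s.contains x = false := by simpa using hx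
      have hfx : (!s.contains x) = true := by rw [hx']; rfl
      rw [PySem.Set.add, if_neg hx, ih _ h.2]
      simp only [List.filter_cons, hfx, if_true]
      have hcons : x :: List.filter (fun y => !s.contains y) t
          = [x] ++ List.filter (fun y => !s.contains y) t := rfl
      rw [hcons, ← List.append_assoc]
      congr 1
      apply List.filter_congr
      intro y hy
      have hyx : y ≠ x := fun e => h.1 (e ▸ hy)
      simp [hyx]

-- map and filter-on-the-key commute
theorem pv_map_fst_filter (l : List (String × Int)) (q : String → Bool) :
    (l.filter (fun p => q p.1)).map Prod.fst = (l.map Prod.fst).filter q := by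
  induction l with
  | nil => rfl
  | cons h t ih => by_cases hq : q h.1 <;> simp [hq, ih]

-- B's running best over keys is max?'s fold, paired with its key value
theorem pv_best_eq_maxfold (g : String → Int) (xs : List String) (acc : Option String) :
    xs.foldl (fun b k => pvBest b k (g k)) (acc.map (fun m => (m, g m)))
      = (xs.foldl (pvMaxStep g) acc).map (fun m => (m, g m)) := by
  induction xs generalizing acc with
  | nil => rfl
  | cons x t ih =>
    cases acc with
    | none => exact ih (some x)
    | some b =>
      rw [List.foldl_cons, List.foldl_cons]
      by_cases hlt : g b < g x
      · have h1 : pvBest (Option.map (fun m => (m, g m)) (some b)) x (g x)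
            = Option.map (fun m => (m, g m)) (some x) := by
          simp [pvBest, hlt]
        have h2 : pvMaxStep g (some b) x = some x := by simp [pvMaxStep, hlt]
        rw [h1, h2, ih]
      · have h1 : pvBest (Option.map (fun m => (m, g m)) (some b)) x (g x)
            = Option.map (fun m => (m, g m)) (some b) := by
          simp [pvBest, hlt]
        have h2 : pvMaxStep g (some b) x = some b := by simp [pvMaxStep, hlt]
        rw [h1, h2, ih]

-- A reduces to the first strict maximum over pvOrder under pvG
theorem pvA_eq (yesterday two_days_ago : List (String × Int))
    (hy : (yesterday.map Prod.fst).Nodup) (ht : (two_days_ago.map Prod.fst).Nodup) :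
    identify_closer_py yesterday two_days_ago
      = PySem.List.max? (pvOrder yesterday two_days_ago) (pvG yesterday two_days_ago) := by
  unfold identify_closer_py
  simp only []
  set totals1 : PySem.Dict String Int :=
    yesterday.foldl (fun d p => d.insert p.1 (d.getD p.1 0 + p.2)) PySem.Dict.empty with ht1
  set totals : PySem.Dict String Int :=
    two_days_ago.foldl (fun d p => d.insert p.1 (d.getD p.1 0 + p.2)) totals1 with ht2
  have hgetD : ∀ k, totals.getD k 0 = pvG yesterday two_days_ago k := by
    intro k
    rw [ht2, pv_addfold_getD, ht1, pv_addfold_getD]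
    unfold pvG
    rw [pv_mk_getD_eq_sumF yesterday k hy, pv_mk_getD_eq_sumF two_days_ago k ht]
    simp [PySem.Dict.getD_empty]
  have hkeys : totals.keys = pvOrder yesterday two_days_ago := by
    have h1 : totals1.keys = yesterday.map Prod.fst := by
      rw [ht1, PySem.Dict.keys_foldl_insert_key]
      simp only [PySem.Dict.keys_empty]
      have h0 : PySem.Set.update [] (yesterday.map Prod.fst)
          = PySem.Set.ofList (yesterday.map Prod.fst) := rfl
      rw [h0, PySem.Set.ofList_eq_self_of_nodup _ hy]
    rw [ht2, PySem.Dict.keys_foldl_insert_key, h1, pv_update_eq_append_filter _ _ ht]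
    rfl
  by_cases hnil : totals.items = []
  · have ho : pvOrder yesterday two_days_ago = [] := by
      rw [← hkeys, PySem.Dict.keys, hnil]; rfl
    simp [hnil, ho, PySem.List.max?]
  · rw [if_neg hnil, hkeys]
    congr 1
    funext p
    exact hgetD p

-- B reduces to the same first strict maximum over pvOrder under pvG
theorem pvB_eq (yesterday two_days_ago : List (String × Int)) :
    identify_closer_py_alt yesterday two_days_ago
      = PySem.List.max? (pvOrder yesterday two_days_ago) (pvG yesterday two_days_ago) := by
  unfold identify_closer_py_alt
  simp only []
  set dy : PySem.Dict String Int := PySem.Dict.mk yesterday with hdy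
  set dt : PySem.Dict String Int := PySem.Dict.mk two_days_ago with hdt
  have hgdef : ∀ k, pvG yesterday two_days_ago k = dy.getD k 0 + dt.getD k 0 := fun _ => rfl
  -- first loop
  have hloop1 :
      yesterday.foldl (fun best p => pvBest best p.1 (dy.getD p.1 0 + dt.getD p.1 0)) none
        = (yesterday.map Prod.fst).foldl
            (fun b k => pvBest b k (pvG yesterday two_days_ago k)) none := by
    rw [List.foldl_map]
    rfl
  -- second loop
  have hbody : (fun (best : Option (String × Int)) (p : String × Int) =>
        if dy.contains p.1 then best else pvBest best p.1 (dt.getD p.1 0))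
      = (fun best p =>
        if (!dy.contains p.1) then pvBest best p.1 (pvG yesterday two_days_ago p.1) else best) := by
    funext best p
    by_cases hc : dy.contains p.1
    · simp [hc]
    · have h0 : dy.getD p.1 0 = 0 :=
        PySem.Dict.getD_of_not_contains _ _ (by simpa using hc)
      simp [hc, hgdef, h0]
  have hloop2 : ∀ (s : Option (String × Int)),
      two_days_ago.foldl (fun best p =>
          if dy.contains p.1 then best else pvBest best p.1 (dt.getD p.1 0)) s
        = (((two_days_ago.map Prod.fst).filter
              (fun k => !(yesterday.map Prod.fst).contains k))).foldl
            (fun b k => pvBest b k (pvG yesterday two_days_ago k)) s := by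
    intro s
    rw [hbody, PySem.List.foldl_if_eq_foldl_filter
      (p := fun q : String × Int => !dy.contains q.1)
      (f := fun (best : Option (String × Int)) (q : String × Int) =>
        pvBest best q.1 (pvG yesterday two_days_ago q.1)),
      ← List.foldl_map (f := (Prod.fst : String × Int → String))
        (g := fun (b : Option (String × Int)) (k : String) =>
          pvBest b k (pvG yesterday two_days_ago k))]
    congr 1
    rw [pv_map_fst_filter two_days_ago (fun k => !dy.contains k)]
    apply List.filter_congr
    intro k _
    rw [hdy, pv_dict_contains_eq]
  rw [hloop1, hloop2, ← List.foldl_append]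
  have hmf := pv_best_eq_maxfold (pvG yesterday two_days_ago)
    (pvOrder yesterday two_days_ago) none
  simp only [Option.map_none] at hmf
  unfold pvOrder at hmf
  rw [hmf, pv_max?_eq_foldl]
  unfold pvOrder
  cases ((yesterday.map Prod.fst
      ++ (two_days_ago.map Prod.fst).filter
          (fun k => !(yesterday.map Prod.fst).contains k)).foldl
      (pvMaxStep (pvG yesterday two_days_ago)) none) <;> rfl

-- ===== VERDICT (by name: the statement is the Claim_ definition above) =====
theorem identify_closer_py_spec : Claim_equal_identify_closer_py := by
  intro yesterday two_days_ago _ hpre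
  obtain ⟨hy, ht⟩ := hpre
  unfold Spec_identify_closer_py
  rw [pvA_eq yesterday two_days_ago hy ht, pvB_eq yesterday two_days_ago]
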